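-- pv_equiv track=rewrite | github.com/typ49/Semestre_6 | sécurité/TP/TP_Heam/decrypter.py | trouver_mots_frequents
-- ===== SOURCE A (Python) =====
-- def trouver_mots_frequents(texte, mots_frequents):
--     """Identifie les occurrences de mots fréquents dans le texte chiffré."""
--     mots_texte = texte.split()
--     correspondances = {}
--     for mot in mots_texte:
--         if mot in mots_frequents:
--             if mot in correspondances:
--                 correspondances[mot] += 1
--             else:
--                 correspondances[mot] = 1
--     return correspondances
-- ===== SOURCE B (Python) =====
-- def trouver_mots_frequents(texte, mots_frequents):
--     """Identifie les occurrences de mots frequents dans le texte chiffre.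
--     Dedup + per-word counting: take the distinct words in first-occurrence
--     order, and for each distinct frequent word count its occurrences with a
--     separate full scan of the word list (no incremental counting dict)."""
--     mots = texte.split()
--     return {m: mots.count(m) for m in dict.fromkeys(mots) if m in mots_frequents}
-- ===== Notes on version B (the rewrite author's own statement) =====
-- stated objective: alternative
-- what changed: A counts incrementally with a membership-guarded dict-increment loop over the words; B keeps no running counts at all: it deduplicates the word list to its distinct words in first-occurrence order and, for each distinct frequent word, computes its count by a separate full scan with list.count.
import Mathlib
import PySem

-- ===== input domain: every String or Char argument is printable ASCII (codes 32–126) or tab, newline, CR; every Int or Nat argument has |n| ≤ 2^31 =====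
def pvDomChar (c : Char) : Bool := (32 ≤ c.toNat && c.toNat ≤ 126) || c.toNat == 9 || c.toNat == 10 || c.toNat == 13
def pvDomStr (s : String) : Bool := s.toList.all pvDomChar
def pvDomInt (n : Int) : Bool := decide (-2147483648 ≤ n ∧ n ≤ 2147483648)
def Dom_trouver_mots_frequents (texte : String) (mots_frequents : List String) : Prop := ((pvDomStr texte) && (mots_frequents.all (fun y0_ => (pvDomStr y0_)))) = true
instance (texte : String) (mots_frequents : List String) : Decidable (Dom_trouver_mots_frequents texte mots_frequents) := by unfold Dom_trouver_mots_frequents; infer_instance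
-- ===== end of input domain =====

-- B replaces A's membership-guarded incremental dict-count loop by dedup-then-count: the distinct words in first-occurrence order, each counted with a separate full scan (alternative algorithm, same cost class).


-- ===== PORT A =====
-- literal port: texte.split() = PySem.Str.split₀; the guarded increment loop over the words;
-- 'correspondances[mot] += 1' only runs under the 'mot in correspondances' guard, so getD _ 0 is exact.
def trouver_mots_frequents (texte : String) (mots_frequents : List String) : List (String × Int) :=
  let mots_texte := PySem.Str.split₀ texte
  let correspondances : PySem.Dict String Int :=
    mots_texte.foldl (fun d mot =>
      if mots_frequents.contains mot then
        if d.contains mot then d.insert mot (d.getD mot 0 + 1)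
        else d.insert mot 1
      else d) PySem.Dict.empty
  correspondances.items

-- ===== PORT B =====
-- literal port of Source B: dict.fromkeys(mots) = distinct words in first-occurrence order
-- (PySem.Set.ofList); the comprehension filters to frequent words and counts each with mots.count.
def trouver_mots_frequents_alt (texte : String) (mots_frequents : List String) : List (String × Int) :=
  let mots := PySem.Str.split₀ texte
  ((PySem.Set.ofList mots).filter (fun m => mots_frequents.contains m)).map
    (fun m => (m, (mots.count m : Int)))

-- ===== PRECONDITION & SPEC =====
def Spec_trouver_mots_frequents (texte : String) (mots_frequents : List String) (out : List (String × Int)) : Prop := out = trouver_mots_frequents_alt texte mots_frequents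
instance (texte : String) (mots_frequents : List String) (out : List (String × Int)) : Decidable (Spec_trouver_mots_frequents texte mots_frequents out) := by unfold Spec_trouver_mots_frequents; infer_instance

-- ===== CLAIM (what is proved, stated in full; the proofs are below) =====
def Claim_equal_trouver_mots_frequents : Prop := ∀ (texte : String) (mots_frequents : List String), Dom_trouver_mots_frequents texte mots_frequents → Spec_trouver_mots_frequents texte mots_frequents (trouver_mots_frequents texte mots_frequents)

-- ===== LEMMAS AND PROOFS =====

-- dedup commutes with filter (generalized over the accumulator for the foldl induction)
theorem pv_foldl_add_filter {α : Type} [BEq α] [LawfulBEq α] (p : α → Bool) (xs t : List α) :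
    (xs.filter p).foldl PySem.Set.add (t.filter p) = (xs.foldl PySem.Set.add t).filter p := by
  induction xs generalizing t with
  | nil => rfl
  | cons x xs ih =>
    by_cases hp : p x = true
    · have hadd : PySem.Set.add (t.filter p) x = (PySem.Set.add t x).filter p := by
        by_cases hm : x ∈ t
        · simp [PySem.Set.add, hm, hp]
        · simp [PySem.Set.add, hm, hp, List.filter_append]
      rw [List.filter_cons_of_pos hp]
      simp only [List.foldl_cons]
      rw [hadd]
      exact ih (PySem.Set.add t x)
    · have hp' : p x = false := by simpa using hp
      have hadd : (PySem.Set.add t x).filter p = t.filter p := by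
        by_cases hm : x ∈ t
        · simp [PySem.Set.add, hm]
        · simp [PySem.Set.add, hm, hp', List.filter_append]
      rw [List.filter_cons_of_neg (by simp [hp'])]
      simp only [List.foldl_cons]
      rw [← hadd]
      exact ih (PySem.Set.add t x)

theorem pv_ofList_filter {α : Type} [BEq α] [LawfulBEq α] (p : α → Bool) (xs : List α) :
    PySem.Set.ofList (xs.filter p) = (PySem.Set.ofList xs).filter p := by
  simpa [PySem.Set.ofList, PySem.Set.empty] using pv_foldl_add_filter p xs []

-- A's guarded step equals the unguarded counting step under the frequent-word test
theorem pv_stepA_eq (mf : List String) :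
    (fun (d : PySem.Dict String Int) mot =>
      if mf.contains mot then
        if d.contains mot then d.insert mot (d.getD mot 0 + 1)
        else d.insert mot 1
      else d)
    = (fun (d : PySem.Dict String Int) mot =>
        if mf.contains mot then d.insert mot (d.getD mot 0 + 1) else d) := by
  funext d mot
  by_cases hf : mot ∈ mf
  · by_cases hc : d.contains mot = true
    · simp [hf, hc]
    · have hc' : d.contains mot = false := by simpa using hc
      rw [PySem.Dict.getD_of_not_contains d 0 hc']
      simp [hf, hc']
  · simp [hf]

-- A's whole loop is the plain counting loop over the pre-filtered word list
theorem pv_A_eq_counter (mf ws : List String) :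
    ws.foldl (fun d mot =>
        if mf.contains mot then d.insert mot (d.getD mot 0 + 1) else d)
      PySem.Dict.empty
    = PySem.Dict.counter (ws.filter (fun m => mf.contains m)) := by
  rw [← PySem.Dict.foldl_insert_getD_add_one_eq_counter, List.foldl_filter]

-- ===== VERDICT (by name: the statement is the Claim_ definition above) =====
theorem trouver_mots_frequents_spec : Claim_equal_trouver_mots_frequents := by
  intro texte mots_frequents _
  unfold Spec_trouver_mots_frequents trouver_mots_frequents trouver_mots_frequents_alt
  dsimp only
  rw [pv_stepA_eq, pv_A_eq_counter, PySem.Dict.items_counter, pv_ofList_filter]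
  apply List.map_congr_left
  intro k hk
  have hpk : mots_frequents.contains k = true := by
    simpa using (List.of_mem_filter hk)
  rw [List.count_filter (p := fun m => mots_frequents.contains m) (by simpa using hpk)]
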